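-- pv_equiv track=rewrite | github.com/Nathan-Marshall/picross-solver | picross_solver.py | verify_line
-- ===== SOURCE A (Python) =====
-- CROSSED = -1
--
-- UNKNOWN = 0
--
-- FILLED = 1
--
-- def find_end(line, i, tile_type=FILLED):
--     for j in range(i, len(line)):
--         if line[j] != tile_type:
--             return j
--     return len(line)
--
-- def verify_line(puzzle_line, clue_run_lengths):
--     # All tiles must be known
--     for tile in puzzle_line:
--         if tile == UNKNOWN:
--             return False
--
--     prev_run_end = 0
--     for clue_run_length in clue_run_lengths:
--         # Find the start of the next run
--         run_start = find_end(puzzle_line, prev_run_end, tile_type=CROSSED)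
--
--         # Reached the end of the line without encountering the run
--         if run_start == len(puzzle_line):
--             return False
--
--         # Find the end of the run
--         run_end = find_end(puzzle_line, run_start)
--
--         # Verify that the run was the correct length
--         if run_end != run_start + clue_run_length:
--             return False
--
--         prev_run_end = run_end
--
--     # Verify that it's all crosses until the end of the line
--     line_end = find_end(puzzle_line, prev_run_end, tile_type=CROSSED)
--     return line_end == len(puzzle_line)
-- ===== SOURCE B (Python) =====
-- CROSSED = -1
--
-- UNKNOWN = 0
--
-- FILLED = 1
--
-- def verify_line(puzzle_line, clue_run_lengths):
--     runs = []
--     count = 0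
--     for tile in puzzle_line:
--         if tile == FILLED:
--             count += 1
--         elif tile == CROSSED:
--             if count:
--                 runs.append(count)
--                 count = 0
--         else:
--             # tile is UNKNOWN or not a valid tile value: the line cannot verify
--             return False
--     if count:
--         runs.append(count)
--     return runs == list(clue_run_lengths)
-- ===== Notes on version B (the rewrite author's own statement) =====
-- stated objective: simpler
-- what changed: A walks the line with a pointer per clue (two find_end scans per clue plus start/end/trailing-cross checks); B makes one pass over the line that rejects any non-FILLED/CROSSED tile and collects the maximal filled run lengths, then compares that list with list(clue_run_lengths).
import Mathlib
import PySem

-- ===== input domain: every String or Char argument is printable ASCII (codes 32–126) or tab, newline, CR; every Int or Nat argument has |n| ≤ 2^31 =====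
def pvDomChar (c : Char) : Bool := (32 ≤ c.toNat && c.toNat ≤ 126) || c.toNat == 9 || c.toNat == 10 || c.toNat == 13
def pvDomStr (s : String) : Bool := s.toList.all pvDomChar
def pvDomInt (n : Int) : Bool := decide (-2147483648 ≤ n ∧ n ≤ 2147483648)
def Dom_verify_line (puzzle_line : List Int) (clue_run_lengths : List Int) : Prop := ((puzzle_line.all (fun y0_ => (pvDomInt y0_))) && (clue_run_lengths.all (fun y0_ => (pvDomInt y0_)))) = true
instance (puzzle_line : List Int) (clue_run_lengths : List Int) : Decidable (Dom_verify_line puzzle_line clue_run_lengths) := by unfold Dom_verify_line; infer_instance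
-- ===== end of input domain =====

-- B replaces A's per-clue pointer walk (two find_end scans per clue plus start/end/trailing
-- checks) by one left-to-right pass that collects the filled run lengths and compares them
-- with the clue list (objective: simpler). Return-value equivalence; no argument is mutated.

-- ===== PORT A =====
-- find_end: for j in range(i, len(line)): if line[j] != tile_type: return j / return len(line)
def find_end_go (line : List Int) (tile_type : Int) : List Int → Int
  | [] => PySem.List.len line
  | j :: js => if PySem.List.pyGet? line j ≠ some tile_type then j else find_end_go line tile_type js

def find_end (line : List Int) (i : Int) (tile_type : Int) : Int :=
  find_end_go line tile_type (PySem.List.pyRange i (PySem.List.len line) 1)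

-- the 'for clue_run_length in clue_run_lengths' loop; none = an early 'return False'
def verify_clues (line : List Int) : List Int → Int → Option Int
  | [], prev_run_end => some prev_run_end
  | clue_run_length :: rest, prev_run_end =>
    let run_start := find_end line prev_run_end (-1)
    if run_start = PySem.List.len line then none
    else
      let run_end := find_end line run_start 1
      if run_end ≠ run_start + clue_run_length then none
      else verify_clues line rest run_end

def verify_line (puzzle_line : List Int) (clue_run_lengths : List Int) : Bool :=
  if puzzle_line.any (fun tile => tile == 0) then false
  else
    match verify_clues puzzle_line clue_run_lengths 0 with
    | none => false
    | some prev_run_end => find_end puzzle_line prev_run_end (-1) == PySem.List.len puzzle_line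

-- ===== PORT B =====
-- the single 'for tile in puzzle_line' loop of B; none = the early 'return False'
def collect_runs : List Int → Int → List Int → Option (List Int)
  | [], count, runs => some (if count ≠ 0 then runs ++ [count] else runs)
  | tile :: rest, count, runs =>
    if tile = 1 then collect_runs rest (count + 1) runs
    else if tile = -1 then
      if count ≠ 0 then collect_runs rest 0 (runs ++ [count]) else collect_runs rest 0 runs
    else none

def verify_line_alt (puzzle_line : List Int) (clue_run_lengths : List Int) : Bool :=
  match collect_runs puzzle_line 0 [] with
  | none => false
  | some runs => runs == clue_run_lengths

-- ===== PRECONDITION & SPEC =====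
def Spec_verify_line (puzzle_line : List Int) (clue_run_lengths : List Int) (out : Bool) : Prop := out = verify_line_alt puzzle_line clue_run_lengths
instance (puzzle_line : List Int) (clue_run_lengths : List Int) (out : Bool) : Decidable (Spec_verify_line puzzle_line clue_run_lengths out) := by unfold Spec_verify_line; infer_instance

-- ===== CLAIM (what is proved, stated in full; the proofs are below) =====
def Claim_equal_verify_line : Prop := ∀ (puzzle_line : List Int) (clue_run_lengths : List Int), Dom_verify_line puzzle_line clue_run_lengths → Spec_verify_line puzzle_line clue_run_lengths (verify_line puzzle_line clue_run_lengths)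

-- ===== LEMMAS AND PROOFS =====

-- suffix-level restatement of A's clue loop plus trailing check (proof helper)
def vcS : List Int → List Int → Bool
  | s, [] => s.all (· == -1)
  | s, c :: rest =>
    let s1 := s.dropWhile (· == -1)
    if s1.length = 0 then false
    else if ((s1.takeWhile (· == 1)).length : Int) ≠ c then false
    else vcS (s1.drop (s1.takeWhile (· == 1)).length) rest

-- run lengths of a line, continuing a current run of length c (proof helper)
def runsAux : List Int → Int → List Int
  | [], c => if c ≠ 0 then [c] else []
  | t :: rest, c => if t = 1 then runsAux rest (c + 1) else if c ≠ 0 then c :: runsAux rest 0 else runsAux rest 0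

lemma drop_len_takeWhile (p : Int → Bool) (l : List Int) :
    l.drop (l.takeWhile p).length = l.dropWhile p := by
  calc l.drop (l.takeWhile p).length
      = (l.takeWhile p ++ l.dropWhile p).drop (l.takeWhile p).length := by
        rw [List.takeWhile_append_dropWhile]
    _ = l.dropWhile p := List.drop_left

lemma head_dropWhile_false {p : Int → Bool} {x : Int} {l tl : List Int}
    (h : l.dropWhile p = x :: tl) : p x = false := by
  induction l with
  | nil => simp at h
  | cons a as ih =>
    rw [List.dropWhile_cons] at h
    split at h
    · exact ih h
    · next hpa => cases h; simpa using hpa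

lemma mem_dropWhile_of_not {p : Int → Bool} {x : Int} (hpx : p x = false) :
    ∀ {l : List Int}, x ∈ l → x ∈ l.dropWhile p := by
  intro l
  induction l with
  | nil => intro h; simp at h
  | cons a as ih =>
    intro h
    rw [List.dropWhile_cons]
    split
    · next hpa =>
      rcases List.mem_cons.mp h with rfl | hm
      · rw [hpa] at hpx; cases hpx
      · exact ih hm
    · exact h

-- find_end returns i plus the length of the maximal tile_type-run starting at i
lemma find_end_spec (xs : List Int) (t : Int) :
    ∀ i : Nat, i ≤ xs.length →
      find_end xs (i : Int) t = (i : Int) + (((xs.drop i).takeWhile (· == t)).length : Int) := by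
  intro i hi
  induction hn : xs.length - i generalizing i with
  | zero =>
    have hie : i = xs.length := by omega
    have hdrop : xs.drop i = [] := by rw [List.drop_eq_nil_iff]; omega
    unfold find_end
    rw [PySem.List.len_eq]
    rw [show (xs.length : Int) = (i : Int) by exact_mod_cast congrArg Nat.cast hie.symm]
    rw [show PySem.List.pyRange (i:Int) (i:Int) 1 = [] by simp [PySem.List.pyRange]]
    show PySem.List.len xs = _
    rw [PySem.List.len_eq, hdrop]
    simp [hie]
  | succ n ih =>
    have hlt : i < xs.length := by omega
    unfold find_end
    rw [PySem.List.len_eq, PySem.List.pyRange_one_cons (by exact_mod_cast hlt)]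
    show (if PySem.List.pyGet? xs (i:Int) ≠ some t then (i:Int)
          else find_end_go xs t (PySem.List.pyRange ((i:Int)+1) (xs.length:Int) 1)) = _
    rw [PySem.List.pyGet?_natCast, List.getElem?_eq_getElem hlt]
    rw [List.drop_eq_getElem_cons hlt]
    rcases Decidable.em (xs[i] = t) with hx | hx
    · rw [if_neg (by simp [hx])]
      have h1 : ((i:Int) + 1) = ((i+1 : Nat) : Int) := by push_cast; ring
      have h2 : find_end_go xs t (PySem.List.pyRange ((i:Int)+1) (xs.length:Int) 1)
          = find_end xs ((i+1:Nat):Int) t := by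
        unfold find_end; rw [PySem.List.len_eq, h1]
      rw [h2, ih (i+1) (by omega) (by omega)]
      simp [List.takeWhile_cons, hx]
      push_cast; ring
    · rw [if_pos (by simp [hx])]
      simp [List.takeWhile_cons, hx]

-- A's clue loop plus trailing check, seen from suffix i, is vcS
lemma A_loop_eq_vcS (xs : List Int) :
    ∀ (clues : List Int) (i : Nat), i ≤ xs.length →
      (match verify_clues xs clues (i : Int) with
       | none => false
       | some p => find_end xs p (-1) == PySem.List.len xs) = vcS (xs.drop i) clues := by
  intro clues
  induction clues with
  | nil =>
    intro i hi
    show (find_end xs (i:Int) (-1) == PySem.List.len xs) = (xs.drop i).all (· == -1)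
    rw [find_end_spec xs (-1) i hi, PySem.List.len_eq]
    set a := ((xs.drop i).takeWhile (· == (-1:Int))).length with ha
    have hale : a ≤ xs.length - i := by
      rw [ha]
      calc ((xs.drop i).takeWhile (· == (-1:Int))).length ≤ (xs.drop i).length :=
            (List.takeWhile_prefix _).length_le
        _ = xs.length - i := List.length_drop
    by_cases hall : (xs.drop i).all (· == -1) = true
    · have htw : (xs.drop i).takeWhile (· == (-1:Int)) = xs.drop i :=
        List.takeWhile_eq_self_iff.mpr (by simpa [List.all_eq_true] using hall)
      have hlen : a = xs.length - i := by rw [ha, htw, List.length_drop]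
      rw [hall]
      simp only [beq_iff_eq]
      rw [hlen]
      push_cast
      omega
    · have hne : a ≠ xs.length - i := by
        intro h
        apply hall
        have : (xs.drop i).takeWhile (· == (-1:Int)) = xs.drop i :=
          (List.takeWhile_prefix _).eq_of_length (by rw [← ha, h, List.length_drop])
        rw [List.all_eq_true]
        intro x hx
        have := List.mem_takeWhile_imp (this ▸ hx)
        simpa using this
      rw [Bool.eq_false_iff.mpr hall]
      simp only [beq_eq_false_iff_ne, ne_eq]
      intro h
      apply hne
      omega
  | cons c rest ih =>
    intro i hi
    have hunf : verify_clues xs (c :: rest) (i:Int) =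
        (if find_end xs (i:Int) (-1) = PySem.List.len xs then none
         else if find_end xs (find_end xs (i:Int) (-1)) 1 ≠ find_end xs (i:Int) (-1) + c then none
         else verify_clues xs rest (find_end xs (find_end xs (i:Int) (-1)) 1)) := rfl
    rw [hunf, PySem.List.len_eq]
    rw [find_end_spec xs (-1) i hi]
    set a := ((xs.drop i).takeWhile (· == (-1:Int))).length with ha
    have hale : a ≤ xs.length - i := by
      rw [ha]
      calc ((xs.drop i).takeWhile (· == (-1:Int))).length ≤ (xs.drop i).length :=
            (List.takeWhile_prefix _).length_le
        _ = xs.length - i := List.length_drop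
    have hs1 : (xs.drop i).dropWhile (· == -1) = xs.drop (i + a) := by
      rw [← drop_len_takeWhile, ← ha, List.drop_drop, Nat.add_comm]
    have hvar : ((i:Int) + (a:Int)) = ((i + a : Nat) : Int) := by push_cast; ring
    show _ = vcS (xs.drop i) (c :: rest)
    have hvcs : vcS (xs.drop i) (c :: rest) =
        (if (xs.drop (i+a)).length = 0 then false
         else if (((xs.drop (i+a)).takeWhile (· == 1)).length : Int) ≠ c then false
         else vcS ((xs.drop (i+a)).drop ((xs.drop (i+a)).takeWhile (· == 1)).length) rest) := by
      show (if ((xs.drop i).dropWhile (· == -1)).length = 0 then false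
            else if ((((xs.drop i).dropWhile (· == -1)).takeWhile (· == 1)).length : Int) ≠ c then false
            else vcS (((xs.drop i).dropWhile (· == -1)).drop
              (((xs.drop i).dropWhile (· == -1)).takeWhile (· == 1)).length) rest) = _
      rw [hs1]
    rw [hvcs]
    by_cases hend : (i:Int) + (a:Int) = (xs.length:Int)
    · rw [if_pos hend]
      have : (xs.drop (i+a)).length = 0 := by rw [List.length_drop]; omega
      rw [if_pos this]
    · rw [if_neg hend]
      have hia : i + a < xs.length := by
        rcases Nat.lt_or_ge (i+a) xs.length with h | h
        · exact h
        · exfalso; apply hend; push_cast; omega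
      have hlen2 : ¬ (xs.drop (i+a)).length = 0 := by rw [List.length_drop]; omega
      rw [if_neg hlen2]
      rw [hvar, find_end_spec xs 1 (i+a) (by omega)]
      set k := ((xs.drop (i+a)).takeWhile (· == (1:Int))).length with hk
      have hkle : k ≤ xs.length - (i+a) := by
        rw [hk]
        calc ((xs.drop (i+a)).takeWhile (· == (1:Int))).length ≤ (xs.drop (i+a)).length :=
              (List.takeWhile_prefix _).length_le
          _ = xs.length - (i+a) := List.length_drop
      by_cases hc : ((k:Nat):Int) ≠ ((i+a:Nat):Int) + c - (i+a:Nat)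
      · have hcond : ((i+a:Nat):Int) + (k:Int) ≠ ((i+a:Nat):Int) + c := by
          intro h; apply hc; omega
        rw [if_pos (by rw [← hvar] at hcond ⊢; push_cast at hcond ⊢; omega)]
        rw [if_pos (by push_cast at hc ⊢; omega)]
      · push_neg at hc
        have hcond : ¬ (((i+a:Nat):Int) + (k:Int) ≠ ((i+a:Nat):Int) + c) := by
          push_neg; omega
        rw [if_neg (by rw [← hvar] at hcond ⊢; push_cast at hcond ⊢; omega)]
        rw [if_neg (by push_cast at hc ⊢; omega)]
        have harg : (xs.drop (i+a)).drop k = xs.drop (i + a + k) := by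
          rw [List.drop_drop]
        rw [harg]
        have hstep : ((i+a:Nat):Int) + (k:Int) = ((i + a + k : Nat) : Int) := by push_cast; ring
        rw [hstep]
        exact ih (i + a + k) (by omega)

lemma collect_runs_bad : ∀ (s : List Int) (c : Int) (acc : List Int),
    (∃ t ∈ s, t ≠ 1 ∧ t ≠ -1) → collect_runs s c acc = none := by
  intro s
  induction s with
  | nil => rintro c acc ⟨t, ht, -⟩; simp at ht
  | cons a as ih =>
    rintro c acc ⟨t, ht, h1, h2⟩
    rcases List.mem_cons.mp ht with rfl | hmem
    · simp [collect_runs, h1, h2]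
    · by_cases ha1 : a = 1
      · simp only [collect_runs, ha1, if_pos rfl]
        exact ih _ _ ⟨t, hmem, h1, h2⟩
      · by_cases ha2 : a = -1
        · by_cases hc : c = 0 <;>
            simp only [collect_runs, ha1, ha2, hc, if_true, if_false, ite_true, ite_false,
              reduceIte, not_true, not_false_iff] <;>
            first
              | exact ih _ _ ⟨t, hmem, h1, h2⟩
              | (split <;> exact ih _ _ ⟨t, hmem, h1, h2⟩)
        · simp [collect_runs, ha1, ha2]

lemma collect_runs_good : ∀ (s : List Int) (c : Int) (acc : List Int),
    (∀ t ∈ s, t = 1 ∨ t = -1) → collect_runs s c acc = some (acc ++ runsAux s c) := by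
  intro s
  induction s with
  | nil => intro c acc _; simp [collect_runs, runsAux]; split <;> simp
  | cons a as ih =>
    intro c acc h
    have has : ∀ t ∈ as, t = 1 ∨ t = -1 := fun t ht => h t (List.mem_cons_of_mem _ ht)
    rcases h a List.mem_cons_self with rfl | rfl
    · simp [collect_runs, runsAux, ih _ _ has]
    · by_cases hc : c = 0 <;>
        simp [collect_runs, runsAux, hc, ih _ _ has]

lemma runsAux_dropC : ∀ s : List Int, runsAux (s.dropWhile (· == -1)) 0 = runsAux s 0 := by
  intro s
  induction s with
  | nil => simp
  | cons a as ih =>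
    by_cases ha : a = -1
    · simp [ha, List.dropWhile_cons, runsAux, ih]
    · simp [List.dropWhile_cons, ha, runsAux]

lemma runsAux_shift : ∀ (s : List Int) (c : Nat),
    0 < c + (s.takeWhile (· == 1)).length →
    runsAux s (c : Int) =
      ((c + (s.takeWhile (· == 1)).length : Nat) : Int) :: runsAux (s.dropWhile (· == 1)) 0 := by
  intro s
  induction s with
  | nil =>
    intro c hc
    simp only [List.takeWhile_nil, List.length_nil, Nat.add_zero] at hc ⊢
    have hc' : (c : Int) ≠ 0 := by omega
    simp [runsAux, hc']; omega
  | cons a as ih =>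
    intro c hc
    by_cases ha : a = 1
    · subst ha
      have h1 : runsAux (1 :: as) (c : Int) = runsAux as (((c + 1 : Nat)) : Int) := by
        simp [runsAux]
      have htw : List.takeWhile (· == (1:Int)) (1 :: as) = 1 :: List.takeWhile (· == (1:Int)) as := by
        simp [List.takeWhile_cons]
      have hdw : List.dropWhile (· == (1:Int)) (1 :: as) = List.dropWhile (· == (1:Int)) as := by
        simp [List.dropWhile_cons]
      rw [h1, htw, hdw, ih (c + 1) (by omega)]
      have : (c + 1) + (List.takeWhile (· == (1:Int)) as).length
           = c + (1 :: List.takeWhile (· == (1:Int)) as).length := by simp; omega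
      rw [this]
    · have htw : List.takeWhile (· == (1:Int)) (a :: as) = [] := by
        simp [List.takeWhile_cons, ha]
      have hdw : List.dropWhile (· == (1:Int)) (a :: as) = a :: as := by
        simp [List.dropWhile_cons, ha]
      rw [htw] at hc ⊢
      simp only [List.length_nil, Nat.add_zero] at hc ⊢
      have hc' : (c : Int) ≠ 0 := by omega
      rw [hdw]
      have h2 : runsAux (a :: as) (c:Int) = (c:Int) :: runsAux as 0 := by
        simp [runsAux, ha]; omega
      have h3 : runsAux (a :: as) 0 = runsAux as 0 := by simp [runsAux, ha]
      rw [h2, h3]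

lemma runsAux_ne_nil (s : List Int) (c : Nat) (hc : 0 < c) : runsAux s (c:Int) ≠ [] := by
  rw [runsAux_shift s c (by omega)]; simp

lemma runsAux_nil_iff : ∀ s : List Int, (∀ t ∈ s, t = 1 ∨ t = -1) →
    (s.all (· == -1)) = (runsAux s 0 == ([] : List Int)) := by
  intro s
  induction s with
  | nil => simp [runsAux]
  | cons a as ih =>
    intro h
    have has : ∀ t ∈ as, t = 1 ∨ t = -1 := fun t ht => h t (List.mem_cons_of_mem _ ht)
    rcases h a List.mem_cons_self with rfl | rfl
    · have h0 : runsAux (1 :: as) 0 = runsAux as 1 := by simp [runsAux]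
      have h1 := runsAux_ne_nil as 1 (by omega)
      simp only [Nat.cast_one] at h1
      simp [h0, h1]
    · have h0 : runsAux (-1 :: as) 0 = runsAux as 0 := by simp [runsAux]
      simp [h0, ih has]

lemma vcS_bad : ∀ (clues s : List Int) (b : Int),
    b ∈ s → b ≠ 1 → b ≠ -1 → vcS s clues = false := by
  intro clues
  induction clues with
  | nil =>
    intro s b hb h1 h2
    simp only [vcS]
    exact List.all_eq_false.mpr ⟨b, hb, by simp [h2]⟩
  | cons c rest ih =>
    intro s b hb h1 h2
    have hb1 : b ∈ s.dropWhile (· == -1) := mem_dropWhile_of_not (by simp [h2]) hb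
    simp only [vcS]
    have hne : ¬ (s.dropWhile (· == -1)).length = 0 := by
      intro h
      rw [List.length_eq_zero_iff] at h
      rw [h] at hb1; simp at hb1
    rw [if_neg hne]
    split
    · rfl
    · rw [drop_len_takeWhile]
      exact ih _ b (mem_dropWhile_of_not (by simp [h1]) hb1) h1 h2

lemma vcS_good : ∀ (clues s : List Int), (∀ t ∈ s, t = 1 ∨ t = -1) →
    vcS s clues = (runsAux s 0 == clues) := by
  intro clues
  induction clues with
  | nil => intro s hs; simpa [vcS] using runsAux_nil_iff s hs
  | cons c rest ih =>
    intro s hs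
    simp only [vcS]
    by_cases hnil : (s.dropWhile (· == -1)).length = 0
    · rw [if_pos hnil]
      rw [List.length_eq_zero_iff] at hnil
      have : runsAux s 0 = [] := by rw [← runsAux_dropC s, hnil]; simp [runsAux]
      simp [this]
    · rw [if_neg hnil]
      have hsub : ∀ t ∈ s.dropWhile (· == -1), t = 1 ∨ t = -1 := fun t ht =>
        hs t ((List.dropWhile_suffix _).subset ht)
      have hk : 0 < ((s.dropWhile (· == -1)).takeWhile (· == 1)).length := by
        rcases hd : s.dropWhile (· == -1) with _ | ⟨h1, tl⟩
        · rw [hd] at hnil; simp at hnil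
        · have hmem : h1 ∈ s.dropWhile (· == -1) := by rw [hd]; simp
          have hh1 : h1 = 1 := by
            rcases hsub h1 hmem with h | h
            · exact h
            · exfalso
              have := head_dropWhile_false hd
              simp [h] at this
          subst hh1
          simp [List.takeWhile_cons]
      have hruns : runsAux s 0 =
          ((((s.dropWhile (· == -1)).takeWhile (· == 1)).length : Int)) ::
            runsAux ((s.dropWhile (· == -1)).dropWhile (· == 1)) 0 := by
        rw [← runsAux_dropC s]
        have := runsAux_shift (s.dropWhile (· == -1)) 0 (by omega)
        simpa using this
      by_cases hc : (((s.dropWhile (· == -1)).takeWhile (· == 1)).length : Int) ≠ c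
      · rw [if_pos hc]
        rw [hruns]
        simp [hc]
      · rw [if_neg hc]
        push_neg at hc
        rw [drop_len_takeWhile]
        rw [ih _ (fun t ht => hsub t ((List.dropWhile_suffix _).subset ht))]
        rw [hruns, hc]
        simp

lemma verify_line_eq_vcS (pl cl : List Int) :
    verify_line pl cl = if pl.any (fun tile => tile == 0) then false else vcS pl cl := by
  unfold verify_line
  by_cases h0 : pl.any (fun tile => tile == 0)
  · rw [if_pos h0, if_pos h0]
  · rw [if_neg h0, if_neg h0]
    have := A_loop_eq_vcS pl cl 0 (Nat.zero_le _)
    simpa using this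

lemma main_eq (pl cl : List Int) : verify_line pl cl = verify_line_alt pl cl := by
  by_cases hg : ∀ t ∈ pl, t = 1 ∨ t = -1
  · have h0 : pl.any (fun tile => tile == 0) = false := by
      rw [List.any_eq_false]
      intro t ht
      rcases hg t ht with rfl | rfl <;> simp
    rw [verify_line_eq_vcS, h0]
    show vcS pl cl = _
    rw [vcS_good cl pl hg]
    unfold verify_line_alt
    rw [collect_runs_good pl 0 [] hg]
    simp
  · have hbad : ∃ b ∈ pl, b ≠ 1 ∧ b ≠ -1 := by
      push_neg at hg
      obtain ⟨b, hb, h⟩ := hg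
      exact ⟨b, hb, h⟩
    obtain ⟨b, hb, h1, h2⟩ := hbad
    have hB : verify_line_alt pl cl = false := by
      unfold verify_line_alt
      rw [collect_runs_bad pl 0 [] ⟨b, hb, h1, h2⟩]
    rw [hB, verify_line_eq_vcS]
    by_cases h0 : pl.any (fun tile => tile == 0)
    · rw [if_pos h0]
    · rw [if_neg h0]
      exact vcS_bad cl pl b hb h1 h2

-- ===== VERDICT (by name: the statement is the Claim_ definition above) =====
theorem verify_line_spec : Claim_equal_verify_line := by
  intro pl cl _
  unfold Spec_verify_line
  exact main_eq pl cl
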